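-- pv_equiv track=rewrite | github.com/chrisk60331/slack-hitl-chat | jira_mcp/core.py | _select_role_url
-- ===== SOURCE A (Python) =====
-- def _select_role_url(roles_map: dict[str, str], preferred_names: list[str]) -> tuple[str, str] | None:
--     if not roles_map:
--         return None
--     lowered_to_name: dict[str, str] = {name.lower(): name for name in roles_map.keys()}
--     for name in preferred_names:
--         exact = lowered_to_name.get(name.lower())
--         if exact:
--             return exact, roles_map[exact]
--     for name in preferred_names:
--         token = name.lower()
--         for candidate_lower, original_name in lowered_to_name.items():
--             if token in candidate_lower:
--                 return original_name, roles_map[original_name]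
--     return None
-- ===== SOURCE B (Python) =====
-- def _select_role_url(roles_map: dict[str, str], preferred_names: list[str]) -> tuple[str, str] | None:
--     lowered_to_name: dict[str, str] = {name.lower(): name for name in roles_map.keys()}
--     fallback = None
--     for name in preferred_names:
--         token = name.lower()
--         exact = lowered_to_name.get(token)
--         if exact:
--             return exact, roles_map[exact]
--         if fallback is None:
--             for candidate_lower, original_name in lowered_to_name.items():
--                 if token in candidate_lower:
--                     fallback = (original_name, roles_map[original_name])
--                     break
--     return fallback
-- ===== Notes on version B (the rewrite author's own statement) =====
-- stated objective: alternative
-- what changed: A scans preferred_names twice (an exact-match pass, then a substring-fallback pass); B makes a single pass that returns an exact match immediately and records the first substring fallback on the fly, returning it only after the loop.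
import Mathlib
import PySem

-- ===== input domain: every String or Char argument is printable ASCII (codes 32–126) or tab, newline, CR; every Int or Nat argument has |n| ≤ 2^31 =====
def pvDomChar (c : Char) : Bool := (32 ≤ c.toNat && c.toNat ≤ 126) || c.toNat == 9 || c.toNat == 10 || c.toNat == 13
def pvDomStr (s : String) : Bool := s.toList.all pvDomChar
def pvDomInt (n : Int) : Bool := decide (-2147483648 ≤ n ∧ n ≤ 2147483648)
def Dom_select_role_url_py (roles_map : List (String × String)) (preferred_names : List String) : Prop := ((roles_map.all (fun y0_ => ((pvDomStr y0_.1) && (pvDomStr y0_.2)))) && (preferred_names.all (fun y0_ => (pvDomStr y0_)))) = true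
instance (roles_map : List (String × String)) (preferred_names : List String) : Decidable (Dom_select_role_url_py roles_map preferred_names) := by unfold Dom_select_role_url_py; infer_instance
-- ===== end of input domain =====

-- B fuses A's two passes over preferred_names into one pass carrying a pending substring
-- fallback (objective: alternative decomposition; same asymptotic cost).


-- ===== PORT A =====
-- {name.lower(): name for name in roles_map.keys()}  (shared by both Pythons, literally)
def pvLowered (keys : List String) : PySem.Dict String String :=
  keys.foldl (fun acc name => acc.insert (PySem.Str.lower name) name) PySem.Dict.empty

-- A's first loop: 'for name in preferred_names: exact = …get(name.lower()); if exact: return …'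
def pvExactLoop (lowered d : PySem.Dict String String) : List String → Option (String × String)
  | [] => none
  | n :: ns =>
    match lowered.get? (PySem.Str.lower n) with
    | some exact => if exact = "" then pvExactLoop lowered d ns else some (exact, d.getD exact "")
    | none => pvExactLoop lowered d ns

-- A's inner loop: 'for candidate_lower, original_name in lowered_to_name.items(): if token in …: return …'
-- (roles_map[original_name] ported as getD with "" — original_name is always a key, so the default is never used)
def pvSubInner (d : PySem.Dict String String) (token : String) : List (String × String) → Option (String × String)
  | [] => none
  | (cl, orig) :: rest =>
    if PySem.Str.isIn token cl then some (orig, d.getD orig "") else pvSubInner d token rest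

-- A's second loop over preferred_names
def pvSubLoop (lowered d : PySem.Dict String String) : List String → Option (String × String)
  | [] => none
  | n :: ns =>
    match pvSubInner d (PySem.Str.lower n) lowered.items with
    | some r => some r
    | none => pvSubLoop lowered d ns

def select_role_url_py (roles_map : List (String × String)) (preferred_names : List String) : Option (String × String) :=
  let d := PySem.Dict.ofList roles_map
  if d.items = [] then none
  else
    let lowered := pvLowered d.keys
    match pvExactLoop lowered d preferred_names with
    | some r => some r
    | none => pvSubLoop lowered d preferred_names

-- ===== PORT B =====
-- B's inner scan with break: first candidate whose lowered key contains the token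
def pvScan (d : PySem.Dict String String) (token : String) : List (String × String) → Option (String × String)
  | [] => none
  | (cl, orig) :: rest =>
    if PySem.Str.isIn token cl then some (orig, d.getD orig "") else pvScan d token rest

-- 'if fallback is None: … break'
def pvFbSet (lowered d : PySem.Dict String String) (fb : Option (String × String)) (token : String) : Option (String × String) :=
  match fb with
  | some _ => fb
  | none => pvScan d token lowered.items

-- B's single loop carrying the pending fallback
def pvBLoop (lowered d : PySem.Dict String String) : List String → Option (String × String) → Option (String × String)
  | [], fb => fb
  | n :: ns, fb =>
    match lowered.get? (PySem.Str.lower n) with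
    | some exact =>
      if exact = "" then pvBLoop lowered d ns (pvFbSet lowered d fb (PySem.Str.lower n))
      else some (exact, d.getD exact "")
    | none => pvBLoop lowered d ns (pvFbSet lowered d fb (PySem.Str.lower n))

def select_role_url_py_alt (roles_map : List (String × String)) (preferred_names : List String) : Option (String × String) :=
  let d := PySem.Dict.ofList roles_map
  let lowered := pvLowered d.keys
  pvBLoop lowered d preferred_names none

-- ===== PRECONDITION & SPEC =====
def Spec_select_role_url_py (roles_map : List (String × String)) (preferred_names : List String) (out : Option (String × String)) : Prop := out = select_role_url_py_alt roles_map preferred_names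
instance (roles_map : List (String × String)) (preferred_names : List String) (out : Option (String × String)) : Decidable (Spec_select_role_url_py roles_map preferred_names out) := by unfold Spec_select_role_url_py; infer_instance

-- ===== CLAIM (what is proved, stated in full; the proofs are below) =====
def Claim_equal_select_role_url_py : Prop := ∀ (roles_map : List (String × String)) (preferred_names : List String), Dom_select_role_url_py roles_map preferred_names → Spec_select_role_url_py roles_map preferred_names (select_role_url_py roles_map preferred_names)

-- ===== LEMMAS AND PROOFS =====
lemma pvScan_eq_pvSubInner (d : PySem.Dict String String) (t : String) (l : List (String × String)) :
    pvScan d t l = pvSubInner d t l := by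
  induction l with
  | nil => rfl
  | cons p rest ih => cases p with | mk cl orig => simp [pvScan, pvSubInner, ih]

lemma pvBLoop_eq (lowered d : PySem.Dict String String) (ns : List String) (fb : Option (String × String)) :
    pvBLoop lowered d ns fb
      = (pvExactLoop lowered d ns).or (fb.or (pvSubLoop lowered d ns)) := by
  induction ns generalizing fb with
  | nil => cases fb <;> rfl
  | cons n rest ih =>
    have hsub : pvSubLoop lowered d (n :: rest)
        = (pvSubInner d (PySem.Str.lower n) lowered.items).or (pvSubLoop lowered d rest) := by
      simp only [pvSubLoop]
      cases pvSubInner d (PySem.Str.lower n) lowered.items <;> rfl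
    have hfb : pvFbSet lowered d fb (PySem.Str.lower n)
        = fb.or (pvSubInner d (PySem.Str.lower n) lowered.items) := by
      cases fb <;> simp [pvFbSet, pvScan_eq_pvSubInner, Option.or]
    simp only [pvBLoop, pvExactLoop]
    cases hget : lowered.get? (PySem.Str.lower n) with
    | none =>
      rw [ih, hsub, hfb, Option.or_assoc]
    | some exact =>
      by_cases hx : exact = ""
      · simp only [if_pos hx]
        rw [ih, hsub, hfb, Option.or_assoc]
      · simp only [if_neg hx]
        rfl

lemma pvBLoop_empty (d : PySem.Dict String String) (ns : List String) :
    pvBLoop (pvLowered []) d ns none = none := by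
  induction ns with
  | nil => rfl
  | cons n rest ih =>
    simp only [pvBLoop, pvLowered, List.foldl_nil]
    rw [PySem.Dict.get?_empty]
    simpa [pvFbSet, pvScan, PySem.Dict.empty] using ih

-- ===== VERDICT (by name: the statement is the Claim_ definition above) =====
theorem select_role_url_py_spec : Claim_equal_select_role_url_py := by
  intro roles_map preferred_names _
  unfold Spec_select_role_url_py select_role_url_py select_role_url_py_alt
  simp only []
  by_cases h : (PySem.Dict.ofList roles_map).items = []
  · rw [if_pos h]
    have hk : (PySem.Dict.ofList roles_map).keys = [] := by
      simp [PySem.Dict.keys, h]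
    rw [hk, pvBLoop_empty]
  · rw [if_neg h, pvBLoop_eq]
    cases pvExactLoop (pvLowered (PySem.Dict.ofList roles_map).keys) (PySem.Dict.ofList roles_map) preferred_names <;>
      cases hs : pvSubLoop (pvLowered (PySem.Dict.ofList roles_map).keys) (PySem.Dict.ofList roles_map) preferred_names <;>
      simp [Option.or]
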